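-- pv_equiv track=rewrite | github.com/ghostrider77/BioinformaticsProblems | Python/textbook_track/chapter02/ba2h.py | distance_between_pattern_and_text
-- ===== SOURCE A (Python) =====
-- def calc_hamming_distance(s1, s2):
--     distance = 0
--     for c1, c2 in zip(s1, s2):
--         if c1 != c2:
--             distance += 1
--     return distance
--
-- def distance_between_pattern_and_text(text, pattern, k):
--     minimal_distance = k
--     for ix in range(len(text)-k+1):
--         k_mer = text[ix:ix+k]
--         distance = calc_hamming_distance(pattern, k_mer)
--         if distance < minimal_distance:
--             minimal_distance = distance
--     return minimal_distance
-- ===== SOURCE B (Python) =====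
-- def distance_between_pattern_and_text(text, pattern, k):
--     n = len(text)
--     m = n - k + 1
--     if m <= 0:
--         return k
--     counts = [0] * m
--     for j in range(min(len(pattern), k)):
--         c = pattern[j]
--         counts = [cnt + (ch != c) for cnt, ch in zip(counts, text[j:])]
--     return min(k, min(counts))
-- ===== Notes on version B (the rewrite author's own statement) =====
-- stated objective: alternative
-- what changed: replaces the per-alignment slice+zip Hamming scan with a column-wise pass: one mismatch-count array over all alignments, updated by zipping it with the shifted text once per pattern position, then a single builtin min over the array
import Mathlib
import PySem

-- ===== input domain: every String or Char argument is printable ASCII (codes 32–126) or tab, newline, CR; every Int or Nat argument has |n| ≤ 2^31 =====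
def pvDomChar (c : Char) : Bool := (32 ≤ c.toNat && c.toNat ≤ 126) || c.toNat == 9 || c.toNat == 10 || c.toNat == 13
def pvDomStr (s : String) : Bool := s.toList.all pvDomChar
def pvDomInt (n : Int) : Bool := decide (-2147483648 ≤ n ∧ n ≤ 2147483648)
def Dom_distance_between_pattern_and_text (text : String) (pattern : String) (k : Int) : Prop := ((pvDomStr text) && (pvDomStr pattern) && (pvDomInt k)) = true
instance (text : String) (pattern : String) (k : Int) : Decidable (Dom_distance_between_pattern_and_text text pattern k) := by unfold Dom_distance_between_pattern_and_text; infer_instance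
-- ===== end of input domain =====

-- B replaces A's per-alignment slice+zip Hamming scan by a column-wise pass (one mismatch-count
-- array over all alignments, bumped once per pattern position, then one builtin min): an
-- alternative traversal of the same cost, proved to return the same value on all inputs.

-- ===== PORT A =====
def pvCalcHammingDistance (s1 : String) (s2 : String) : Int :=
  (s1.toList.zip s2.toList).foldl
    (fun distance cc => if cc.1 ≠ cc.2 then distance + 1 else distance) 0

def distance_between_pattern_and_text (text : String) (pattern : String) (k : Int) : Int :=
  (PySem.List.pyRange 0 (PySem.Str.len text - k + 1) 1).foldl
    (fun minimal_distance ix =>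
      let k_mer := PySem.Str.slice text (some ix) (some (ix + k))
      let distance := pvCalcHammingDistance pattern k_mer
      if distance < minimal_distance then distance else minimal_distance)
    k

-- ===== PORT B =====
def distance_between_pattern_and_text_alt (text : String) (pattern : String) (k : Int) : Int :=
  let n := PySem.Str.len text
  let m := n - k + 1
  if m ≤ 0 then k
  else
    let counts : List Int := List.replicate m.toNat 0
    let counts :=
      (PySem.List.pyRange 0 (min (PySem.Str.len pattern) k) 1).foldl
        (fun counts j =>
          let c := PySem.Str.pyGet? pattern j
          (counts.zip (PySem.Str.slice text (some j) none).toList).map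
            (fun q => q.1 + if some q.2 ≠ c then 1 else 0))
        counts
    -- Python's `min(counts)`: counts is nonempty here (m > 0), so the none branch is unreachable
    match PySem.List.min? counts (fun x => x) with
    | some mn => min k mn
    | none => k

-- ===== PRECONDITION & SPEC =====
def Spec_distance_between_pattern_and_text (text : String) (pattern : String) (k : Int) (out : Int) : Prop := out = distance_between_pattern_and_text_alt text pattern k
instance (text : String) (pattern : String) (k : Int) (out : Int) : Decidable (Spec_distance_between_pattern_and_text text pattern k out) := by unfold Spec_distance_between_pattern_and_text; infer_instance

-- ===== CLAIM (what is proved, stated in full; the proofs are below) =====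
def Claim_equal_distance_between_pattern_and_text : Prop := ∀ (text : String) (pattern : String) (k : Int), Dom_distance_between_pattern_and_text text pattern k → Spec_distance_between_pattern_and_text text pattern k (distance_between_pattern_and_text text pattern k)

-- ===== LEMMAS AND PROOFS =====

-- mismatch count of alignment i: positions j < L where text[i+j] and pattern[j] disagree
def pvMis (t p : List Char) (L i : Nat) : Nat :=
  (List.range L).countP (fun j => decide (t[i + j]? ≠ p[j]?))

theorem pvHam_eq_countP (s1 s2 : String) :
    pvCalcHammingDistance s1 s2 =
      (((s1.toList.zip s2.toList).countP (fun cc => decide (cc.1 ≠ cc.2))) : Int) := by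
  unfold pvCalcHammingDistance
  rw [PySem.List.foldl_ite_add_one (fun cc : Char × Char => cc.1 ≠ cc.2)]
  simp

theorem pvHam_nonneg (s1 s2 : String) : 0 ≤ pvCalcHammingDistance s1 s2 := by
  rw [pvHam_eq_countP]; exact_mod_cast Nat.zero_le _

theorem pvCountP_zip : ∀ (p w : List Char),
    (p.zip w).countP (fun cc => decide (cc.1 ≠ cc.2)) =
      (List.range (min p.length w.length)).countP (fun j => decide (p[j]? ≠ w[j]?)) := by
  intro p
  induction p with
  | nil => intro w; simp
  | cons a p ih =>
      intro w
      cases w with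
      | nil => simp
      | cons b w =>
          simp only [List.zip_cons_cons, List.countP_cons, List.length_cons,
            Nat.succ_min_succ, List.range_succ_eq_map, List.countP_map]
          rw [ih w]
          simp [Function.comp_def, Nat.add_comm]
          rfl

-- one column pass of B: zip the counts with the shifted text and bump on mismatch
theorem pvZipMapGetD (cs : List Int) (w : List Char) (c : Option Char) (r : Nat)
    (hc : r < cs.length) (hw : r < w.length) :
    ((cs.zip w).map (fun q => q.1 + if some q.2 ≠ c then 1 else 0)).getD r 0 =
      cs.getD r 0 + (if some (w[r]) ≠ c then 1 else 0) := by
  have hz : r < (cs.zip w).length := by rw [List.length_zip]; omega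
  have hm : r < ((cs.zip w).map (fun q => q.1 + if some q.2 ≠ c then 1 else 0)).length := by
    rw [List.length_map]; exact hz
  rw [List.getD_eq_getElem _ 0 hm, List.getElem_map, List.getElem_zip,
    List.getD_eq_getElem _ 0 hc]

-- the outer loop of B: folding the column pass over any list of pattern positions
theorem pvOuterFold (t p : List Char) (kN : Nat) (hkn : kN ≤ t.length) :
    ∀ (js : List Nat) (cs : List Int), (∀ j ∈ js, j < kN) → cs.length = t.length - kN + 1 →
      (js.foldl (fun cs j => (cs.zip (t.drop j)).map
          (fun q => q.1 + if some q.2 ≠ p[j]? then 1 else 0)) cs).length = t.length - kN + 1 ∧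
      ∀ r, r < t.length - kN + 1 →
        (js.foldl (fun cs j => (cs.zip (t.drop j)).map
            (fun q => q.1 + if some q.2 ≠ p[j]? then 1 else 0)) cs).getD r 0 =
          cs.getD r 0 + (js.countP (fun j => decide (t[r + j]? ≠ p[j]?)) : Int) := by
  intro js
  induction js with
  | nil => intro cs _ h; exact ⟨h, fun r _ => by simp⟩
  | cons j js ih =>
      intro cs hjs h
      have hj : j < kN := hjs j List.mem_cons_self
      simp only [List.foldl_cons]
      have hlen' : ((cs.zip (t.drop j)).map
          (fun q => q.1 + if some q.2 ≠ p[j]? then 1 else 0)).length = t.length - kN + 1 := by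
        rw [List.length_map, List.length_zip, List.length_drop]
        omega
      obtain ⟨hL, hG⟩ := ih _ (fun x hx => hjs x (List.mem_cons_of_mem _ hx)) hlen'
      refine ⟨hL, fun r hr => ?_⟩
      rw [hG r hr]
      have hrd : r < (t.drop j).length := by rw [List.length_drop]; omega
      rw [pvZipMapGetD cs (t.drop j) (p[j]?) r (by omega) hrd]
      have hsome : some ((t.drop j)[r]'hrd) = t[r + j]? :=
        calc some ((t.drop j)[r]'hrd) = (t.drop j)[r]? := (List.getElem?_eq_getElem hrd).symm
          _ = t[j + r]? := List.getElem?_drop ..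
          _ = t[r + j]? := by rw [Nat.add_comm]
      rw [List.countP_cons]
      have hind : (if some ((t.drop j)[r]'hrd) ≠ p[j]? then (1 : Int) else 0) =
          (if decide (t[r + j]? ≠ p[j]?) then (1 : Int) else 0) := by
        rw [← hsome]; simp
      rw [hind]
      by_cases hq : t[r + j]? ≠ p[j]? <;> simp [hq] <;> omega

theorem pvIfLtMin (a b : Int) : (if b < a then b else a) = min a b := by
  rw [min_def]; split_ifs <;> omega

theorem pvFoldlMinMin (l : List Int) : ∀ a b : Int, l.foldl min (min a b) = min a (l.foldl min b) := by
  induction l with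
  | nil => intro a b; rfl
  | cons c t ih =>
      intro a b
      simp only [List.foldl_cons, min_assoc]
      exact ih a (min b c)

theorem pvMinMatchFoldl (l : List Int) (hl : l ≠ []) (k : Int) :
    (match PySem.List.min? l (fun x => x) with
     | some mn => min k mn
     | none => k) = l.foldl min k := by
  cases l with
  | nil => exact absurd rfl hl
  | cons x t =>
      rw [PySem.List.min?_id_cons]
      simp only [List.foldl_cons]
      rw [← pvFoldlMinMin]

theorem pvFoldlMinKeep (l : List Int) (a : Int) (h : ∀ x ∈ l, a ≤ x) : l.foldl min a = a := by
  induction l with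
  | nil => rfl
  | cons x t ih =>
      simp only [List.foldl_cons]
      rw [min_eq_left (h x List.mem_cons_self)]
      exact ih (fun y hy => h y (List.mem_cons_of_mem _ hy))

-- A's loop as a min-fold over the list of per-alignment Hamming distances
theorem pvA_eq (text pattern : String) (k : Int) :
    distance_between_pattern_and_text text pattern k =
      ((PySem.List.pyRange 0 (PySem.Str.len text - k + 1) 1).map
        (fun ix => pvCalcHammingDistance pattern (PySem.Str.slice text (some ix) (some (ix + k))))).foldl min k := by
  unfold distance_between_pattern_and_text
  rw [List.foldl_map]
  congr 1
  funext a ix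
  simp only []
  rw [pvIfLtMin]

-- A's Hamming distance at alignment i is the column-wise mismatch count at i
theorem pvAlign (text pattern : String) (k : Int) (hk : 0 ≤ k) (i : Nat)
    (hi : i + k.toNat ≤ text.toList.length) :
    pvCalcHammingDistance pattern (PySem.Str.slice text (some (i : Int)) (some ((i : Int) + k))) =
      (pvMis text.toList pattern.toList (min pattern.toList.length k.toNat) i : Int) := by
  rw [pvHam_eq_countP]
  have hks : k = ((k.toNat : Nat) : Int) := (Int.toNat_of_nonneg hk).symm
  rw [hks]
  have hsl : (PySem.Str.slice text (some (i : Int)) (some ((i : Int) + (k.toNat : Int)))).toList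
      = (text.toList.drop i).take k.toNat := by
    rw [PySem.Str.toList_slice, PySem.Chars.slice_eq_listSlice, PySem.List.slice_natCast_add]
  rw [hsl, pvCountP_zip]
  have hwlen : ((text.toList.drop i).take k.toNat).length = k.toNat := by
    rw [List.length_take, List.length_drop]
    omega
  rw [hwlen]
  unfold pvMis
  congr 1
  apply List.countP_congr
  intro j hj
  have hjL : j < min pattern.toList.length k.toNat := List.mem_range.mp hj
  have hjk : j < k.toNat := lt_of_lt_of_le hjL (min_le_right _ _)
  have hw : ((text.toList.drop i).take k.toNat)[j]? = text.toList[i + j]? := by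
    rw [List.getElem?_take_of_lt hjk, List.getElem?_drop]
  rw [hw]
  simp [ne_comm]

theorem pvMain (text pattern : String) (k : Int) :
    distance_between_pattern_and_text text pattern k = distance_between_pattern_and_text_alt text pattern k := by
  have hlen : PySem.Str.len text = (text.toList.length : Int) := PySem.Str.len_eq text
  by_cases hm : PySem.Str.len text - k + 1 ≤ 0
  · -- no alignment at all: both return k
    rw [pvA_eq, PySem.List.pyRange_one_eq_nil hm]
    simp only [List.map_nil, List.foldl_nil]
    simp only [distance_between_pattern_and_text_alt]
    rw [if_pos hm]
  · push_neg at hm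
    by_cases hk : k < 0
    · -- k < 0: A never improves on k; B's pattern loop is empty and min over zeros yields k
      rw [pvA_eq, pvFoldlMinKeep]
      · simp only [distance_between_pattern_and_text_alt]
        rw [if_neg (by omega)]
        rw [PySem.List.pyRange_one_eq_nil (le_trans (min_le_right _ _) (by omega : k ≤ 0))]
        simp only [List.foldl_nil]
        rw [pvMinMatchFoldl _ (by
          simp only [ne_eq, List.replicate_eq_nil_iff]
          omega)]
        rw [pvFoldlMinKeep]
        intro x hx
        rw [List.eq_of_mem_replicate hx]
        omega
      · intro x hx
        obtain ⟨ix, _, rfl⟩ := List.mem_map.mp hx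
        have h0 := pvHam_nonneg pattern (PySem.Str.slice text (some ix) (some (ix + k)))
        omega
    · push_neg at hk
      have hm' : 0 < (text.toList.length : Int) - k + 1 := by rw [← hlen]; exact hm
      have hkk : k = (k.toNat : Int) := (Int.toNat_of_nonneg hk).symm
      have hkn : k.toNat ≤ text.toList.length := by omega
      have hmcast : PySem.Str.len text - k + 1 = ((text.toList.length - k.toNat + 1 : Nat) : Int) := by
        rw [hlen]; omega
      -- A's value as a min-fold over the per-alignment mismatch counts
      rw [pvA_eq, hmcast, PySem.List.pyRange_zero_natCast, List.map_map]
      have hmapA : (List.range (text.toList.length - k.toNat + 1)).map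
            ((fun ix => pvCalcHammingDistance pattern (PySem.Str.slice text (some ix) (some (ix + k)))) ∘ (fun i : Nat => (i : Int)))
          = (List.range (text.toList.length - k.toNat + 1)).map
            (fun i => (pvMis text.toList pattern.toList (min pattern.toList.length k.toNat) i : Int)) := by
        apply List.map_congr_left
        intro i hi
        simp only [Function.comp_apply]
        exact pvAlign text pattern k hk i (by have := List.mem_range.mp hi; omega)
      rw [hmapA]
      -- B's value as the same min-fold
      have hB : distance_between_pattern_and_text_alt text pattern k =
          List.foldl min k ((List.range (text.toList.length - k.toNat + 1)).map
            (fun i => (pvMis text.toList pattern.toList (min pattern.toList.length k.toNat) i : Int))) := by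
        simp only [distance_between_pattern_and_text_alt]
        rw [if_neg (by rw [hlen]; omega)]
        rw [hmcast, Int.toNat_natCast]
        have hjb : min (PySem.Str.len pattern) k = ((min pattern.toList.length k.toNat : Nat) : Int) := by
          rw [PySem.Str.len_eq pattern]; omega
        rw [hjb]
        simp only [PySem.List.pyRange_zero_natCast, List.foldl_map, PySem.Str.pyGet?_natCast,
          PySem.Str.toList_slice, PySem.Chars.slice_eq_listSlice, PySem.List.slice_from_natCast]
        obtain ⟨hLen, hGet⟩ := pvOuterFold text.toList pattern.toList k.toNat hkn
          (List.range (min pattern.toList.length k.toNat))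
          (List.replicate (text.toList.length - k.toNat + 1) 0)
          (fun j hj => lt_of_lt_of_le (List.mem_range.mp hj) (min_le_right _ _))
          (List.length_replicate)
        have hfold : (List.range (min pattern.toList.length k.toNat)).foldl
              (fun cs j => (cs.zip (text.toList.drop j)).map
                (fun q => q.1 + if some q.2 ≠ pattern.toList[j]? then 1 else 0))
              (List.replicate (text.toList.length - k.toNat + 1) 0)
            = (List.range (text.toList.length - k.toNat + 1)).map
              (fun r => (pvMis text.toList pattern.toList (min pattern.toList.length k.toNat) r : Int)) := by
          apply List.ext_getElem
          · rw [hLen]; simp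
          · intro r h1 h2
            have hr : r < text.toList.length - k.toNat + 1 := by rw [hLen] at h1; exact h1
            rw [List.getElem_map, List.getElem_range]
            rw [← List.getD_eq_getElem _ 0 h1]
            rw [hGet r hr]
            simp [pvMis]
        rw [hfold]
        rw [pvMinMatchFoldl _ (by simp [ne_eq, List.map_eq_nil_iff, List.range_eq_nil])]
        rw [List.foldl_map]
      rw [hB]

-- ===== VERDICT (by name: the statement is the Claim_ definition above) =====
theorem distance_between_pattern_and_text_spec : Claim_equal_distance_between_pattern_and_text := by
  unfold Claim_equal_distance_between_pattern_and_text
  intro text pattern k _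
  unfold Spec_distance_between_pattern_and_text
  exact pvMain text pattern k
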